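-- pv_equiv track=rewrite | github.com/valoup917/area-valentin.fouillet | backend/trigger/trigger.py | interpret_parameters
-- ===== SOURCE A (Python) =====
-- def interpret_parameters(params):
--     is_body = False
--     is_header = False
--     is_query = False
--     for param in params:
--         if params[param] == "header":
--             is_header = True
--         elif params[param] == "body":
--             is_body = True
--         elif params[param] == "query":
--             is_query = True
--     return (is_body, is_header, is_query)
-- ===== SOURCE B (Python) =====
-- def interpret_parameters(params):
--     vals = list(params.values())
--     return ("body" in vals, "header" in vals, "query" in vals)
-- ===== Notes on version B (the rewrite author's own statement) =====
-- stated objective: simpler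
-- what changed: Replaced the key-iterating flag-setting loop with if/elif branches by three direct membership tests on the dict's values list.
import Mathlib
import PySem

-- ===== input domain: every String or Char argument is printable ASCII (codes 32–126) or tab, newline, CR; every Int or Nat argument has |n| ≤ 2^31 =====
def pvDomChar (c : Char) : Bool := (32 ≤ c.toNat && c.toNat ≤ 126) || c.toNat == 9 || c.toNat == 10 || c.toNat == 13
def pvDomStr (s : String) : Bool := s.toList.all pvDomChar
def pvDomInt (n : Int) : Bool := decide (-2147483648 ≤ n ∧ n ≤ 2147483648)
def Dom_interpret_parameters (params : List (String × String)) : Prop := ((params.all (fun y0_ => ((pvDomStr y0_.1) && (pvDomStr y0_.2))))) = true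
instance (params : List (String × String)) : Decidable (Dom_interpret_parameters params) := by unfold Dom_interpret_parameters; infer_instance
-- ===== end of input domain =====

-- B replaces A's key-iterating flag-setting loop (if/elif) by three membership tests
-- on the dict's values list; objective: simpler. params is a Python dict, modelled as
-- PySem.Dict built from the association list (duplicate keys overwrite, as in Python).

-- ===== PORT A =====
def interpret_parameters (params : List (String × String)) : Bool × Bool × Bool :=
  let d := PySem.Dict.ofList params
  -- for param in params: if params[param] == "header": … elif "body" elif "query"
  d.keys.foldl (fun st param =>
    if d.get? param = some "header" then (st.1, true, st.2.2)
    else if d.get? param = some "body" then (true, st.2.1, st.2.2)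
    else if d.get? param = some "query" then (st.1, st.2.1, true)
    else st) (false, false, false)

-- ===== PORT B =====
def interpret_parameters_alt (params : List (String × String)) : Bool × Bool × Bool :=
  let vals := (PySem.Dict.ofList params).values
  (vals.contains "body", vals.contains "header", vals.contains "query")

-- ===== PRECONDITION & SPEC =====
def Spec_interpret_parameters (params : List (String × String)) (out : Bool × Bool × Bool) : Prop := out = interpret_parameters_alt params
instance (params : List (String × String)) (out : Bool × Bool × Bool) : Decidable (Spec_interpret_parameters params out) := by unfold Spec_interpret_parameters; infer_instance

-- ===== CLAIM (what is proved, stated in full; the proofs are below) =====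
def Claim_equal_interpret_parameters : Prop := ∀ (params : List (String × String)), Dom_interpret_parameters params → Spec_interpret_parameters params (interpret_parameters params)

-- ===== LEMMAS AND PROOFS =====

-- folding A's flag-setting step over a list of values computes the three membership tests
theorem pv_valfold (vs : List String) (st : Bool × Bool × Bool) :
    vs.foldl (fun st v =>
      if v = "header" then (st.1, true, st.2.2)
      else if v = "body" then (true, st.2.1, st.2.2)
      else if v = "query" then (st.1, st.2.1, true)
      else st) st
    = (st.1 || vs.contains "body", st.2.1 || vs.contains "header", st.2.2 || vs.contains "query") := by
  induction vs generalizing st with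
  | nil => simp
  | cons v vs ih =>
    simp only [List.foldl_cons, ih, List.contains_cons]
    split_ifs with h1 h2 h3 <;> try simp_all [eq_comm]
    have e1 : ("header" == v) = false := by
      simp [beq_eq_false_iff_ne]; exact fun h => h1 h.symm
    have e2 : ("body" == v) = false := by
      simp [beq_eq_false_iff_ne]; exact fun h => h2 h.symm
    have e3 : ("query" == v) = false := by
      simp [beq_eq_false_iff_ne]; exact fun h => h3 h.symm
    simp [e1, e2, e3]

theorem pv_get?_of_mem_keys {d : PySem.Dict String String} {k : String}
    (h : k ∈ PySem.Dict.keys d) : PySem.Dict.get? d k = some (PySem.Dict.getD d k "") := by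
  rcases ho : PySem.Dict.get? d k with _ | v
  · exact absurd h ((PySem.Dict.get?_eq_none_iff_not_mem_keys d k).mp ho)
  · rw [PySem.Dict.getD_eq_get?_getD, ho]; rfl

theorem interpret_parameters_spec : Claim_equal_interpret_parameters := by
  intro params _
  unfold Spec_interpret_parameters interpret_parameters interpret_parameters_alt
  set d := PySem.Dict.ofList params with hd
  have hg : d.keys.foldl (fun st param =>
      if d.get? param = some "header" then (st.1, true, st.2.2)
      else if d.get? param = some "body" then (true, st.2.1, st.2.2)
      else if d.get? param = some "query" then (st.1, st.2.1, true)
      else st) (false, false, false)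
    = d.keys.foldl (fun st param =>
      if PySem.Dict.getD d param "" = "header" then (st.1, true, st.2.2)
      else if PySem.Dict.getD d param "" = "body" then (true, st.2.1, st.2.2)
      else if PySem.Dict.getD d param "" = "query" then (st.1, st.2.1, true)
      else st) (false, false, false) := by
    apply PySem.List.foldl_congr_mem
    intro acc k hk
    rw [pv_get?_of_mem_keys hk]
    simp
  have hvals : PySem.Dict.values d = d.keys.map (fun k => PySem.Dict.getD d k "") :=
    PySem.Dict.values_eq_map_keys d (PySem.Dict.nodup_keys_ofList params) ""
  rw [hg]
  have hv := pv_valfold (d.keys.map (fun k => PySem.Dict.getD d k "")) (false, false, false)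
  rw [List.foldl_map] at hv
  rw [hv, ← hvals]
  simp
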